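-- pv_equiv track=rewrite | github.com/brodie-neuro/ScholarRef | scholarref.py | _inside_parentheses
-- ===== SOURCE A (Python) =====
-- def _inside_parentheses(text: str, idx: int) -> bool:
--     depth = 0
--     for ch in text[:idx]:
--         if ch == "(":
--             depth += 1
--         elif ch == ")" and depth > 0:
--             depth -= 1
--     return depth > 0
-- ===== SOURCE B (Python) =====
-- def _inside_parentheses(text: str, idx: int) -> bool:
--     close_needed = 0
--     for ch in reversed(text[:idx]):
--         if ch == ")":
--             close_needed += 1
--         elif ch == "(":
--             if close_needed:
--                 close_needed -= 1
--             else: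
--                 return True
--     return False
-- ===== Notes on version B (the rewrite author's own statement) =====
-- stated objective: alternative
-- what changed: Replaced the forward full-prefix depth count (clamped at zero) by a reverse scan from idx toward the start that counts pending ')' and returns True immediately at the first unmatched enclosing '(', so the scan can stop early.
import Mathlib
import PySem

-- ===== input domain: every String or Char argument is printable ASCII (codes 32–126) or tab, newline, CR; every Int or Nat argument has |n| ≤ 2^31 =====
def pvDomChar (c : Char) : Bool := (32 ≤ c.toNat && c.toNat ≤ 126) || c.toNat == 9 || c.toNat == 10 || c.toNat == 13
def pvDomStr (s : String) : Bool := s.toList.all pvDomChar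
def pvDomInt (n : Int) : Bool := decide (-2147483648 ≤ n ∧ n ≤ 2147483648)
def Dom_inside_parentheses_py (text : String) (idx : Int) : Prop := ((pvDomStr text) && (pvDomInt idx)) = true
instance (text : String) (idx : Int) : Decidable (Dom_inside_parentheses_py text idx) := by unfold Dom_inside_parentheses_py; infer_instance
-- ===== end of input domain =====

-- B replaces A's forward clamped depth count of the whole prefix by a reverse scan with early
-- exit at the first unmatched enclosing '(' (objective: alternative decomposition).

-- ===== PORT A =====
-- one loop iteration of A: '(' increments depth, ')' decrements only when depth > 0
def pvStepA (d : Int) (ch : Char) : Int :=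
  if ch = '(' then d + 1 else if ch = ')' ∧ 0 < d then d - 1 else d

def inside_parentheses_py (text : String) (idx : Int) : Bool :=
  decide (0 < (PySem.List.slice text.toList none (some idx)).foldl pvStepA 0)

-- ===== PORT B =====
-- reverse scan: count pending ')', return true at the first unmatched '('
def pvRevScan : List Char → Int → Bool
  | [], _ => false
  | ch :: rest, c =>
    if ch = ')' then pvRevScan rest (c + 1)
    else if ch = '(' then (if c ≠ 0 then pvRevScan rest (c - 1) else true)
    else pvRevScan rest c

def inside_parentheses_py_alt (text : String) (idx : Int) : Bool :=
  pvRevScan (PySem.List.slice text.toList none (some idx)).reverse 0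

-- ===== PRECONDITION & SPEC =====
def Spec_inside_parentheses_py (text : String) (idx : Int) (out : Bool) : Prop := out = inside_parentheses_py_alt text idx
instance (text : String) (idx : Int) (out : Bool) : Decidable (Spec_inside_parentheses_py text idx out) := by unfold Spec_inside_parentheses_py; infer_instance

-- ===== CLAIM (what is proved, stated in full; the proofs are below) =====
def Claim_equal_inside_parentheses_py : Prop := ∀ (text : String) (idx : Int), Dom_inside_parentheses_py text idx → Spec_inside_parentheses_py text idx (inside_parentheses_py text idx)

-- ===== LEMMAS AND PROOFS =====

theorem pvStepA_nonneg (d : Int) (ch : Char) (h : 0 ≤ d) : 0 ≤ pvStepA d ch := by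
  unfold pvStepA; split_ifs <;> omega

theorem foldl_pvStepA_nonneg (l : List Char) (d : Int) (h : 0 ≤ d) :
    0 ≤ l.foldl pvStepA d := by
  induction l generalizing d with
  | nil => simpa using h
  | cons ch rest ih => exact ih _ (pvStepA_nonneg d ch h)

theorem pvStepA_close (d : Int) : pvStepA d ')' = if 0 < d then d - 1 else d := by
  unfold pvStepA; split_ifs <;> simp_all

theorem pvStepA_open (d : Int) : pvStepA d '(' = d + 1 := by
  unfold pvStepA; rw [if_pos rfl]

theorem pvStepA_other (d : Int) (ch : Char) (h1 : ch ≠ ')') (h2 : ch ≠ '(') :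
    pvStepA d ch = d := by
  unfold pvStepA; rw [if_neg h2, if_neg (by simp [h1])]

theorem pvRevScan_eq (m : List Char) (c : Int) (hc : 0 ≤ c) :
    pvRevScan m c = decide (c < m.reverse.foldl pvStepA 0) := by
  induction m generalizing c with
  | nil =>
    simp [pvRevScan]
    omega
  | cons ch rest ih =>
    have hd : 0 ≤ rest.reverse.foldl pvStepA 0 := foldl_pvStepA_nonneg _ 0 (by omega)
    simp only [pvRevScan, List.reverse_cons, List.foldl_append, List.foldl_cons, List.foldl_nil]
    by_cases h1 : ch = ')'
    · subst h1
      rw [if_pos rfl, ih (c + 1) (by omega), pvStepA_close]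
      by_cases h3 : 0 < rest.reverse.foldl pvStepA 0
      · rw [if_pos h3]
        simp only [decide_eq_decide]; omega
      · rw [if_neg h3]
        simp only [decide_eq_decide]; omega
    · by_cases h2 : ch = '('
      · subst h2
        rw [if_neg (by decide : ¬ ('(' : Char) = ')'), if_pos rfl, pvStepA_open]
        by_cases h3 : c ≠ 0
        · rw [if_pos h3, ih (c - 1) (by omega)]
          simp only [decide_eq_decide]; omega
        · rw [if_neg h3]
          have hc0 : c = 0 := by omega
          subst hc0
          exact (decide_eq_true (by omega)).symm
      · rw [if_neg h1, if_neg h2, ih c hc, pvStepA_other _ _ h1 h2]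

-- ===== VERDICT (by name: the statement is the Claim_ definition above) =====
theorem inside_parentheses_py_spec : Claim_equal_inside_parentheses_py := by
  intro text idx _
  unfold Spec_inside_parentheses_py inside_parentheses_py inside_parentheses_py_alt
  rw [pvRevScan_eq _ 0 (by omega), List.reverse_reverse]
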